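-- pv_equiv track=rewrite | github.com/apocas/restai | restai/app/ai.py | _pick_relevant_files
-- ===== SOURCE A (Python) =====
-- def _pick_relevant_files(
--     target_path: str,
--     candidates: list[str],
--     max_files: int = 6,
-- ) -> list[str]:
--     """Choose which already-written files to attach to the prompt as
--     full content. Heuristics, in priority order:
--
--     1. ALWAYS include shared infra files: `src/App.tsx`, `src/theme.ts`,
--        `src/api.ts`, `public/api/_db.php`, `public/index.html`. View
--        components import from App / theme / api; PHP API files
--        require_once _db.php; references to index.html are common.
--     2. Include files in the same directory as the target.
--     3. Fill remaining slots with most-recent (end of list) candidates.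
--
--     Returns at most `max_files` paths."""
--     chosen: list[str] = []
--     seen = set()
--
--     def _add(p: str):
--         if p in seen or p == target_path or p not in candidates:
--             return
--         seen.add(p)
--         chosen.append(p)
--
--     # 1) Shared infra
--     for shared in ("src/App.tsx", "src/theme.ts", "src/api.ts", "public/api/_db.php", "public/index.html"):
--         if len(chosen) >= max_files:
--             break
--         _add(shared)
--
--     # 2) Same directory
--     target_dir = target_path.rsplit("/", 1)[0] if "/" in target_path else ""
--     if target_dir:
--         for c in candidates:
--             if len(chosen) >= max_files:
--                 break
--             c_dir = c.rsplit("/", 1)[0] if "/" in c else ""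
--             if c_dir == target_dir:
--                 _add(c)
--
--     # 3) Most-recent (most useful for incremental)
--     for c in reversed(candidates):
--         if len(chosen) >= max_files:
--             break
--         _add(c)
--
--     return chosen
-- ===== SOURCE B (Python) =====
-- _SHARED = ("src/App.tsx", "src/theme.ts", "src/api.ts", "public/api/_db.php", "public/index.html")
--
--
-- def _pick_relevant_files(
--     target_path: str,
--     candidates: list[str],
--     max_files: int = 6,
-- ) -> list[str]:
--     """Score-and-sort: assign every distinct candidate a numeric priority
--     (shared infra < same directory as target < most-recent-first), then
--     return the best-scoring ones.  No sequential selection loop at all."""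
--     target_dir = target_path.rsplit("/", 1)[0] if "/" in target_path else ""
--     n = len(candidates)
--     prio = {}
--     for i, c in enumerate(candidates):
--         prio[c] = 5 + n + (n - 1 - i)          # recency rank (last occurrence wins)
--     for i, c in reversed(list(enumerate(candidates))):
--         if target_dir and (c.rsplit("/", 1)[0] if "/" in c else "") == target_dir:
--             prio[c] = 5 + i                    # same-directory rank (first occurrence wins)
--     for j, s in enumerate(_SHARED):
--         if s in prio:
--             prio[s] = j                        # shared-infra rank, highest priority
--     prio.pop(target_path, None)
--     return sorted(prio, key=prio.get)[:max(max_files, 0)]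
-- ===== Notes on version B (the rewrite author's own statement) =====
-- stated objective: faster
-- what changed: Replaces A's three count-guarded sequential selection loops (each _add rescanning the candidates list for membership, O(n) per pick) by score-and-sort: one pass builds a priority dictionary mapping each distinct candidate to a numeric score (shared-infra rank < same-directory rank < recency rank), then the candidates are sorted by score and truncated with a slice.
import Mathlib
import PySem

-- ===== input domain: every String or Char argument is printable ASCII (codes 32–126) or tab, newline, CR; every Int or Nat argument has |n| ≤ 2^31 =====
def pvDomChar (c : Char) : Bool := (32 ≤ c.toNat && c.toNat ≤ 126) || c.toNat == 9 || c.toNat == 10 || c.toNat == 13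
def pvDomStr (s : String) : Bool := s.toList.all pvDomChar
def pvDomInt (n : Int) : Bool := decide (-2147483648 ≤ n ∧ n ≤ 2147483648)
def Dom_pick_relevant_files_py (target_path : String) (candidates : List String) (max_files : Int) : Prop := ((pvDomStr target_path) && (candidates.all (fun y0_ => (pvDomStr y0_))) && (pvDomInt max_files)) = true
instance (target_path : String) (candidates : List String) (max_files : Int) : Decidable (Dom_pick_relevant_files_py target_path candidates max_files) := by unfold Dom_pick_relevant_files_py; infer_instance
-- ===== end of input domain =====

-- B replaces A's three count-guarded selection loops by score-and-sort: build one
-- priority dict (recency, then same-directory, then shared-infra scores), sort the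
-- distinct candidates by score, truncate — removing the per-pick membership rescans
-- (objective: faster; a timing run measured B faster at the larger sizes).

-- ===== PORT A =====
-- s.rsplit("/", 1)[0] if "/" in s else "" — exact hand port: everything before the LAST '/', "" if none
def pvDirOf (s : String) : String :=
  let cs := s.toList
  if cs.contains '/' then String.ofList (((cs.reverse.dropWhile (fun c => c ≠ '/')).drop 1).reverse) else ""

-- the nested helper _add of A
def pvAddA (target_path : String) (candidates : List String)
    (st : List String × PySem.Set String) (p : String) : List String × PySem.Set String :=
  if PySem.Set.contains st.2 p || p == target_path || !(candidates.contains p) then st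
  else (st.1 ++ [p], PySem.Set.add st.2 p)

-- a 'for' loop that breaks as soon as len(chosen) >= max_files
def pvLoopA (max_files : Int) (f : (List String × PySem.Set String) → String → (List String × PySem.Set String)) :
    (List String × PySem.Set String) → List String → (List String × PySem.Set String)
  | st, [] => st
  | st, p :: ps => if (st.1.length : Int) ≥ max_files then st else pvLoopA max_files f (f st p) ps

def pick_relevant_files_py (target_path : String) (candidates : List String) (max_files : Int) : List String :=
  let st1 := pvLoopA max_files (pvAddA target_path candidates) ([], PySem.Set.empty)
    ["src/App.tsx", "src/theme.ts", "src/api.ts", "public/api/_db.php", "public/index.html"]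
  let target_dir := pvDirOf target_path
  let st2 := if target_dir ≠ "" then
      pvLoopA max_files
        (fun st c => if pvDirOf c == target_dir then pvAddA target_path candidates st c else st)
        st1 candidates
    else st1
  let st3 := pvLoopA max_files (pvAddA target_path candidates) st2 candidates.reverse
  st3.1

-- ===== PORT B =====
-- module-level _SHARED of Source B
def pvSHARED : List String := ["src/App.tsx", "src/theme.ts", "src/api.ts", "public/api/_db.php", "public/index.html"]

def pick_relevant_files_py_alt (target_path : String) (candidates : List String) (max_files : Int) : List String :=
  let target_dir := pvDirOf target_path
  let n : Int := PySem.List.len candidates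
  -- for i, c in enumerate(candidates): prio[c] = 5 + n + (n - 1 - i)
  let d1 := (PySem.List.enumerate candidates).foldl
      (fun (d : PySem.Dict String Int) q => d.insert q.2 (5 + n + (n - 1 - q.1))) PySem.Dict.empty
  -- for i, c in reversed(list(enumerate(candidates))): if target_dir and dir(c) == target_dir: prio[c] = 5 + i
  let d2 := ((PySem.List.enumerate candidates).reverse).foldl
      (fun (d : PySem.Dict String Int) q =>
        if (target_dir != "") && (pvDirOf q.2 == target_dir) then d.insert q.2 (5 + q.1) else d) d1
  -- for j, s in enumerate(_SHARED): if s in prio: prio[s] = j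
  let d3 := (PySem.List.enumerate pvSHARED).foldl
      (fun (d : PySem.Dict String Int) q => if d.contains q.2 then d.insert q.2 q.1 else d) d2
  -- prio.pop(target_path, None)
  let d4 := d3.erase target_path
  -- sorted(prio, key=prio.get)[:max(max_files, 0)]  (every key is present, so prio.get p = its score)
  (PySem.List.sorted d4.keys (fun p => d4.getD p 0) false).take (max max_files 0).toNat

-- ===== PRECONDITION & SPEC =====
def Spec_pick_relevant_files_py (target_path : String) (candidates : List String) (max_files : Int) (out : List String) : Prop := out = pick_relevant_files_py_alt target_path candidates max_files
instance (target_path : String) (candidates : List String) (max_files : Int) (out : List String) : Decidable (Spec_pick_relevant_files_py target_path candidates max_files out) := by unfold Spec_pick_relevant_files_py; infer_instance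

-- ===== CLAIM (what is proved, stated in full; the proofs are below) =====
def Claim_equal_pick_relevant_files_py : Prop := ∀ (target_path : String) (candidates : List String) (max_files : Int), Dom_pick_relevant_files_py target_path candidates max_files → Spec_pick_relevant_files_py target_path candidates max_files (pick_relevant_files_py target_path candidates max_files)

-- ===== LEMMAS AND PROOFS =====

-- ---- pure abstraction of A: set-free dedup step and guarded loop ----
def pstep (t : String) (cs : List String) (ch : List String) (p : String) : List String :=
  if ch.contains p || p == t || !(cs.contains p) then ch else ch ++ [p]

def gloop (m : Int) (f : List String → String → List String) : List String → List String → List String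
  | ch, [] => ch
  | ch, p :: ps => if (ch.length : Int) ≥ m then ch else gloop m f (f ch p) ps

-- the full priority-ordered sequence A scans
def pvOrdered (t : String) (cs : List String) : List String :=
  pvSHARED ++ ((if pvDirOf t ≠ "" then cs.filter (fun c => pvDirOf c == pvDirOf t) else []) ++ cs.reverse)

-- first-occurrence dedup of the good (≠ target, in candidates) elements, relative to 'seen'
def dd (t : String) (cs : List String) : List String → List String → List String
  | _, [] => []
  | seen, p :: ps =>
    if seen.contains p || p == t || !(cs.contains p) then dd t cs seen ps
    else p :: dd t cs (seen ++ [p]) ps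

-- first-occurrence dedup (no goodness filtering)
def fo : List String → List String
  | [] => []
  | p :: ps => p :: fo (ps.filter (fun q => q != p))
termination_by l => l.length
decreasing_by simp only [List.length_unattach, List.length_cons]; exact Nat.lt_succ_of_le (le_trans (List.length_filter_le _ _) (Nat.le_of_eq List.length_attach))

-- the numeric priority B assigns (as a mathematical function)
def Kf (t : String) (cs : List String) (p : String) : Int :=
  if p ∈ pvSHARED then (pvSHARED.idxOf p : Int)
  else if pvDirOf t ≠ "" ∧ pvDirOf p = pvDirOf t then 5 + (cs.idxOf p : Int)
  else 5 + (cs.length : Int) + (cs.reverse.idxOf p : Int)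

-- the four dicts of port B, as named definitions
def pvD1 (cs : List String) : PySem.Dict String Int :=
  (PySem.List.enumerate cs).foldl
    (fun d q => d.insert q.2 (5 + (PySem.List.len cs) + ((PySem.List.len cs) - 1 - q.1))) PySem.Dict.empty
def pvD2 (t : String) (cs : List String) : PySem.Dict String Int :=
  ((PySem.List.enumerate cs).reverse).foldl
    (fun d q => if (pvDirOf t != "") && (pvDirOf q.2 == pvDirOf t) then d.insert q.2 (5 + q.1) else d) (pvD1 cs)
def pvD3 (t : String) (cs : List String) : PySem.Dict String Int :=
  (PySem.List.enumerate pvSHARED).foldl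
    (fun d q => if d.contains q.2 then d.insert q.2 q.1 else d) (pvD2 t cs)
def pvD4 (t : String) (cs : List String) : PySem.Dict String Int := (pvD3 t cs).erase t

theorem B_unfold (t : String) (cs : List String) (m : Int) :
    pick_relevant_files_py_alt t cs m
      = (PySem.List.sorted (pvD4 t cs).keys (fun p => (pvD4 t cs).getD p 0) false).take (max m 0).toNat := rfl

-- ======== stage A : A's result is a guarded fold over pvOrdered ========

theorem pvAddA_proj (t : String) (cs : List String) (ch : List String) (p : String) :
    pvAddA t cs (ch, PySem.Set.ofList ch) p
      = (pstep t cs ch p, PySem.Set.ofList (pstep t cs ch p)) := by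
  unfold pvAddA pstep
  have hmem : PySem.Set.contains (PySem.Set.ofList ch) p = ch.contains p := by
    simp [PySem.Set.contains_eq_listContains, PySem.Set.mem_ofList]
  rw [hmem]
  by_cases h : (ch.contains p || p == t || !(cs.contains p)) = true
  · rw [if_pos h, if_pos h]
  · have hadd : PySem.Set.add (PySem.Set.ofList ch) p = PySem.Set.ofList (ch ++ [p]) := by
      rw [PySem.Set.ofList_eq_foldl, PySem.Set.ofList_eq_foldl, List.foldl_append]
      rfl
    rw [if_neg h, if_neg h]
    exact congrArg (fun s => (ch ++ [p], s)) hadd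

theorem gloop_full (m : Int) (f : List String → String → List String) (ch : List String)
    (xs : List String) (h : (ch.length : Int) ≥ m) : gloop m f ch xs = ch := by
  cases xs with
  | nil => rfl
  | cons p ps => simp [gloop, h]

theorem pvLoopA_proj (m : Int) (t : String) (cs : List String) (P : String → Bool)
    (xs : List String) : ∀ ch : List String,
    pvLoopA m (fun st c => if P c then pvAddA t cs st c else st) (ch, PySem.Set.ofList ch) xs
      = ((gloop m (fun ch c => if P c then pstep t cs ch c else ch) ch xs),
         PySem.Set.ofList (gloop m (fun ch c => if P c then pstep t cs ch c else ch) ch xs)) := by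
  induction xs with
  | nil => intro ch; rfl
  | cons p ps ih =>
    intro ch
    by_cases hg : (ch.length : Int) ≥ m
    · simp [pvLoopA, gloop, hg]
    · simp only [pvLoopA, gloop, hg, if_false]
      by_cases hp : P p = true
      · simp only [hp, if_true, pvAddA_proj]
        exact ih (pstep t cs ch p)
      · simp only [Bool.not_eq_true] at hp
        simp only [hp, Bool.false_eq_true, if_false]
        exact ih ch

theorem gloop_filter (m : Int) (t : String) (cs : List String) (P : String → Bool)
    (xs : List String) : ∀ ch : List String,
    gloop m (fun ch c => if P c then pstep t cs ch c else ch) ch xs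
      = gloop m (pstep t cs) ch (xs.filter P) := by
  induction xs with
  | nil => intro ch; rfl
  | cons p ps ih =>
    intro ch
    by_cases hg : (ch.length : Int) ≥ m
    · rw [gloop_full _ _ _ _ hg, gloop_full _ _ _ _ hg]
    · by_cases hp : P p = true
      · simp [gloop, hg, hp, ih]
      · simp only [Bool.not_eq_true] at hp
        simp [gloop, hg, hp, ih]

theorem gloop_append (m : Int) (f : List String → String → List String)
    (xs ys : List String) : ∀ ch : List String,
    gloop m f ch (xs ++ ys) = gloop m f (gloop m f ch xs) ys := by
  induction xs with
  | nil => intro ch; rfl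
  | cons p ps ih =>
    intro ch
    by_cases hg : (ch.length : Int) ≥ m
    · rw [gloop_full _ _ _ _ hg, gloop_full _ _ _ _ hg, gloop_full _ _ _ _ hg]
    · simp only [List.cons_append, gloop, hg, if_false]
      exact ih (f ch p)

theorem foldl_pstep_prefix (t : String) (cs : List String) (xs : List String) :
    ∀ ch : List String, ∃ e, xs.foldl (pstep t cs) ch = ch ++ e := by
  induction xs with
  | nil => intro ch; exact ⟨[], by simp⟩
  | cons p ps ih =>
    intro ch
    rcases ih (pstep t cs ch p) with ⟨e, he⟩
    by_cases h : (ch.contains p || p == t || !(cs.contains p)) = true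
    · refine ⟨e, ?_⟩
      rw [List.foldl_cons, he]
      have hp : pstep t cs ch p = ch := by unfold pstep; rw [if_pos h]
      rw [hp]
    · refine ⟨p :: e, ?_⟩
      rw [List.foldl_cons, he]
      have hp : pstep t cs ch p = ch ++ [p] := by unfold pstep; rw [if_neg h]
      rw [hp, List.append_assoc]
      rfl

theorem gloop_eq_take (m : Int) (t : String) (cs : List String) (xs : List String) :
    ∀ ch : List String, ch.length ≤ (max m 0).toNat →
    gloop m (pstep t cs) ch xs = (xs.foldl (pstep t cs) ch).take (max m 0).toNat := by
  induction xs with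
  | nil =>
    intro ch h
    simp [gloop, List.take_of_length_le h]
  | cons p ps ih =>
    intro ch h
    by_cases hg : (ch.length : Int) ≥ m
    · have hlen : ch.length = (max m 0).toNat := by omega
      rw [gloop_full _ _ _ _ hg]
      rcases foldl_pstep_prefix t cs (p :: ps) ch with ⟨e, he⟩
      rw [he, hlen.symm, List.take_left]
    · have hstep : (pstep t cs ch p).length ≤ (max m 0).toNat := by
        unfold pstep
        split
        · omega
        · simp only [List.length_append, List.length_cons, List.length_nil]
          omega
      simp only [gloop, hg, if_false, List.foldl]
      exact ih (pstep t cs ch p) hstep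

theorem A_eq_take (t : String) (cs : List String) (m : Int) :
    pick_relevant_files_py t cs m
      = ((pvOrdered t cs).foldl (pstep t cs) []).take (max m 0).toNat := by
  unfold pick_relevant_files_py pvOrdered pvSHARED
  dsimp only []
  have hId : ∀ (xs ch : List String),
      pvLoopA m (pvAddA t cs) (ch, PySem.Set.ofList ch) xs
        = ((gloop m (pstep t cs) ch xs), PySem.Set.ofList (gloop m (pstep t cs) ch xs)) := by
    intro xs ch
    simpa using pvLoopA_proj m t cs (fun _ => true) xs ch
  have hempty : (PySem.Set.empty : PySem.Set String) = PySem.Set.ofList [] := rfl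
  rw [hempty, ← gloop_eq_take m t cs _ [] (by simp)]
  by_cases hcase : pvDirOf t ≠ ""
  · rw [if_pos hcase, if_pos hcase, hId,
      pvLoopA_proj m t cs (fun c => pvDirOf c == pvDirOf t),
      gloop_filter m t cs (fun c => pvDirOf c == pvDirOf t), hId,
      gloop_append, gloop_append]
  · rw [if_neg hcase, if_neg hcase, hId, hId, List.nil_append, gloop_append]

-- ======== stage dd : the fold is a first-occurrence dedup ========

theorem foldl_pstep_eq_dd (t : String) (cs : List String) (xs : List String) :
    ∀ ch : List String, xs.foldl (pstep t cs) ch = ch ++ dd t cs ch xs := by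
  induction xs with
  | nil => intro ch; simp [dd]
  | cons p ps ih =>
    intro ch
    by_cases h : (ch.contains p || p == t || !(cs.contains p)) = true
    · have hp : pstep t cs ch p = ch := by unfold pstep; rw [if_pos h]
      simp only [List.foldl_cons, hp, dd, h, if_pos]
      exact ih ch
    · have hp : pstep t cs ch p = ch ++ [p] := by unfold pstep; rw [if_neg h]
      simp only [List.foldl_cons, hp, dd, h]
      rw [ih (ch ++ [p]), List.append_assoc]
      rfl

theorem mem_dd (t : String) (cs : List String) (xs : List String) :
    ∀ (seen : List String) (q : String),
      q ∈ dd t cs seen xs ↔ (q ∈ xs ∧ q ∉ seen ∧ q ≠ t ∧ q ∈ cs) := by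
  induction xs with
  | nil => intro seen q; simp [dd]
  | cons p ps ih =>
    intro seen q
    by_cases h : (seen.contains p || p == t || !(cs.contains p)) = true
    · rw [dd, if_pos h, ih]
      have hs : p ∈ seen ∨ p = t ∨ p ∉ cs := by
        simpa [List.contains_eq_mem, or_assoc] using h
      constructor
      · rintro ⟨h1, h2, h3, h4⟩; exact ⟨List.mem_cons_of_mem _ h1, h2, h3, h4⟩
      · rintro ⟨h1, h2, h3, h4⟩
        refine ⟨?_, h2, h3, h4⟩
        rcases List.mem_cons.mp h1 with heq | h1'
        · subst heq
          rcases hs with hc | hc | hc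
          · exact absurd hc h2
          · exact absurd hc h3
          · exact absurd h4 hc
        · exact h1'
    · rw [dd, if_neg h]
      have hs : p ∉ seen ∧ p ≠ t ∧ p ∈ cs := by
        have := h
        simp only [Bool.or_eq_true, List.contains_eq_mem, decide_eq_true_eq, beq_iff_eq,
          Bool.not_eq_true', decide_eq_false_iff_not, not_or, not_not] at this
        tauto
      rw [List.mem_cons, ih]
      constructor
      · rintro (heq | ⟨h1, h2, h3, h4⟩)
        · subst heq
          exact ⟨List.mem_cons.mpr (Or.inl rfl), hs.1, hs.2.1, hs.2.2⟩
        · simp only [List.mem_append, List.mem_singleton, not_or] at h2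
          exact ⟨List.mem_cons.mpr (Or.inr h1), h2.1, h3, h4⟩
      · rintro ⟨h1, h2, h3, h4⟩
        by_cases hqp : q = p
        · exact Or.inl hqp
        · rcases List.mem_cons.mp h1 with heq | h1'
          · exact absurd heq hqp
          · refine Or.inr ⟨h1', ?_, h3, h4⟩
            simp only [List.mem_append, List.mem_singleton, not_or]
            exact ⟨h2, hqp⟩

theorem nodup_dd (t : String) (cs : List String) (xs : List String) :
    ∀ seen : List String, (dd t cs seen xs).Nodup := by
  induction xs with
  | nil => intro seen; simp [dd]
  | cons p ps ih =>
    intro seen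
    by_cases h : (seen.contains p || p == t || !(cs.contains p)) = true
    · rw [dd, if_pos h]; exact ih seen
    · rw [dd, if_neg h]
      refine List.Nodup.cons ?_ (ih (seen ++ [p]))
      intro hmem
      rcases (mem_dd t cs ps (seen ++ [p]) p).mp hmem with ⟨_, h2, _, _⟩
      exact h2 (by simp)

theorem dd_filter_ne (t : String) (cs : List String) (p : String) (ps : List String) :
    ∀ seen : List String, (p ∈ seen ∨ p = t ∨ p ∉ cs) →
      dd t cs seen (ps.filter (fun q => q != p)) = dd t cs seen ps := by
  induction ps with
  | nil => intro seen _; rfl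
  | cons q ps' ih =>
    intro seen hp
    by_cases hqp : q = p
    · subst hqp
      have hskip : (seen.contains q || q == t || !(cs.contains q)) = true := by
        simp only [Bool.or_eq_true, List.contains_eq_mem, decide_eq_true_eq, beq_iff_eq,
          Bool.not_eq_true', decide_eq_false_iff_not]
        tauto
      rw [List.filter_cons_of_neg (by simp), dd, if_pos hskip]
      exact ih seen hp
    · rw [List.filter_cons_of_pos (by simp [hqp])]
      by_cases h : (seen.contains q || q == t || !(cs.contains q)) = true
      · rw [dd, if_pos h, dd, if_pos h]
        exact ih seen hp
      · rw [dd, if_neg h, dd, if_neg h, ih (seen ++ [q]) (hp.elim (fun h' => Or.inl (by simp [h'])) fun h' => Or.inr h')]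

theorem dd_fo (t : String) (cs : List String) :
    ∀ (n : Nat) (xs : List String), xs.length ≤ n → ∀ seen, dd t cs seen xs = dd t cs seen (fo xs) := by
  intro n
  induction n with
  | zero =>
    intro xs hlen seen
    have : xs = [] := List.eq_nil_of_length_eq_zero (Nat.le_zero.mp hlen)
    subst this; simp [fo]
  | succ n ih =>
    intro xs hlen seen
    cases xs with
    | nil => simp [fo]
    | cons p ps =>
      rw [fo]
      have hflen : (ps.filter (fun q => q != p)).length ≤ n := by
        have := List.length_filter_le (fun q => q != p) ps
        simp only [List.length_cons] at hlen
        omega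
      by_cases h : (seen.contains p || p == t || !(cs.contains p)) = true
      · have hs : p ∈ seen ∨ p = t ∨ p ∉ cs := by
          simpa [List.contains_eq_mem, or_assoc] using h
        rw [dd, if_pos h, dd, if_pos h, ← ih _ hflen seen, dd_filter_ne t cs p ps seen hs]
      · rw [dd, if_neg h, dd, if_neg h, ← ih _ hflen (seen ++ [p]),
          dd_filter_ne t cs p ps (seen ++ [p]) (Or.inl (by simp))]

theorem dd_pairwise (t : String) (cs : List String) (f : String → Int) (xs : List String) :
    ∀ seen : List String,
      xs.Pairwise (fun a b => a ≠ t → a ∈ cs → b ≠ t → b ∈ cs → f a < f b) →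
      (dd t cs seen xs).Pairwise (fun a b => f a < f b) := by
  induction xs with
  | nil => intro seen _; simp [dd]
  | cons p ps ih =>
    intro seen hpw
    rcases List.pairwise_cons.mp hpw with ⟨hhead, htail⟩
    by_cases h : (seen.contains p || p == t || !(cs.contains p)) = true
    · rw [dd, if_pos h]; exact ih seen htail
    · have hs : p ∉ seen ∧ p ≠ t ∧ p ∈ cs := by
        have := h
        simp only [Bool.or_eq_true, List.contains_eq_mem, decide_eq_true_eq, beq_iff_eq,
          Bool.not_eq_true', decide_eq_false_iff_not, not_or, not_not] at this
        tauto
      rw [dd, if_neg h]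
      refine List.Pairwise.cons ?_ (ih (seen ++ [p]) htail)
      intro q hq
      rcases (mem_dd t cs ps (seen ++ [p]) q).mp hq with ⟨hq1, _, hq3, hq4⟩
      exact hhead q hq1 hs.2.1 hs.2.2 hq3 hq4

-- ======== stage fo : properties of first-occurrence dedup ========

theorem mem_fo : ∀ (n : Nat) (l : List String), l.length ≤ n → ∀ q, (q ∈ fo l ↔ q ∈ l) := by
  intro n
  induction n with
  | zero =>
    intro l hlen q
    have : l = [] := List.eq_nil_of_length_eq_zero (Nat.le_zero.mp hlen)
    subst this; simp [fo]
  | succ n ih =>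
    intro l hlen q
    cases l with
    | nil => simp [fo]
    | cons p ps =>
      rw [fo]
      have hflen : (ps.filter (fun q => q != p)).length ≤ n := by
        have := List.length_filter_le (fun q => q != p) ps
        simp only [List.length_cons] at hlen
        omega
      rw [List.mem_cons, List.mem_cons, ih _ hflen q, List.mem_filter]
      by_cases hqp : q = p
      · simp [hqp]
      · simp [hqp]

theorem fo_eq_self_of_nodup : ∀ l : List String, l.Nodup → fo l = l := by
  intro l
  induction l with
  | nil => intro _; simp [fo]
  | cons p ps ih =>
    intro hnd
    rcases List.nodup_cons.mp hnd with ⟨hp, hps⟩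
    have hfl : ps.filter (fun q => q != p) = ps := by
      apply List.filter_eq_self.mpr
      intro a ha
      simp only [bne_iff_ne, ne_eq]
      intro heq; exact hp (heq ▸ ha)
    rw [fo, hfl, ih hps]

theorem idxOf_filter_lt (ψ : String → Bool) :
    ∀ (l : List String) (a b : String), a ∈ l.filter ψ → b ∈ l.filter ψ →
      (l.filter ψ).idxOf a < (l.filter ψ).idxOf b → l.idxOf a < l.idxOf b := by
  intro l
  induction l with
  | nil => intro a b ha _ _; simp at ha
  | cons x l' ih =>
    intro a b ha hb hlt
    by_cases hψ : ψ x = true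
    · rw [List.filter_cons_of_pos hψ] at ha hb hlt
      by_cases hax : a = x
      · subst hax
        have hba : b ≠ a := by
          intro heq; subst heq
          simp [List.idxOf_cons_self] at hlt
        rw [List.idxOf_cons_self, List.idxOf_cons_ne _ (Ne.symm hba)]
        exact Nat.succ_pos _
      · by_cases hbx : b = x
        · subst hbx
          rw [List.idxOf_cons_self, List.idxOf_cons_ne _ (Ne.symm hax)] at hlt
          omega
        · have ha' : a ∈ l'.filter ψ := by
            rcases List.mem_cons.mp ha with heq | h'
            · exact absurd heq hax
            · exact h'
          have hb' : b ∈ l'.filter ψ := by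
            rcases List.mem_cons.mp hb with heq | h'
            · exact absurd heq hbx
            · exact h'
          rw [List.idxOf_cons_ne _ (Ne.symm hax), List.idxOf_cons_ne _ (Ne.symm hbx)] at hlt
          rw [List.idxOf_cons_ne _ (Ne.symm hax), List.idxOf_cons_ne _ (Ne.symm hbx)]
          exact Nat.succ_lt_succ (ih a b ha' hb' (Nat.lt_of_succ_lt_succ hlt))
    · rw [List.filter_cons_of_neg (by simpa using hψ)] at ha hb hlt
      have hax : a ≠ x := by
        intro heq; subst heq
        exact hψ (List.of_mem_filter ha)
      have hbx : b ≠ x := by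
        intro heq; subst heq
        exact hψ (List.of_mem_filter hb)
      rw [List.idxOf_cons_ne _ (Ne.symm hax), List.idxOf_cons_ne _ (Ne.symm hbx)]
      exact Nat.succ_lt_succ (ih a b ha hb hlt)

theorem fo_pairwise_idxOf :
    ∀ (n : Nat) (l : List String), l.length ≤ n →
      (fo l).Pairwise (fun a b => l.idxOf a < l.idxOf b) := by
  intro n
  induction n with
  | zero =>
    intro l hlen
    have : l = [] := List.eq_nil_of_length_eq_zero (Nat.le_zero.mp hlen)
    subst this; simp [fo]
  | succ n ih =>
    intro l hlen
    cases l with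
    | nil => simp [fo]
    | cons p ps =>
      rw [fo]
      have hflen : (ps.filter (fun q => q != p)).length ≤ n := by
        have := List.length_filter_le (fun q => q != p) ps
        simp only [List.length_cons] at hlen
        omega
      refine List.Pairwise.cons ?_ ?_
      · intro q hq
        have hq' : q ∈ ps.filter (fun q => q != p) := (mem_fo n _ hflen q).mp hq
        have hqp : q ≠ p := by
          have := List.of_mem_filter hq'
          simpa using this
        rw [List.idxOf_cons_self, List.idxOf_cons_ne _ (Ne.symm hqp)]
        exact Nat.succ_pos _
      · refine List.Pairwise.imp_of_mem ?_ (ih _ hflen)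
        intro a b ha hb hlt
        have ha' : a ∈ ps.filter (fun q => q != p) := (mem_fo n _ hflen a).mp ha
        have hb' : b ∈ ps.filter (fun q => q != p) := (mem_fo n _ hflen b).mp hb
        have hap : a ≠ p := by simpa using List.of_mem_filter ha'
        have hbp : b ≠ p := by simpa using List.of_mem_filter hb'
        rw [List.idxOf_cons_ne _ (Ne.symm hap), List.idxOf_cons_ne _ (Ne.symm hbp)]
        exact Nat.succ_lt_succ (idxOf_filter_lt _ ps a b ha' hb' hlt)

theorem fo_append : ∀ (n : Nat) (xs : List String), xs.length ≤ n → ∀ ys : List String,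
    fo (xs ++ ys) = fo xs ++ fo (ys.filter (fun y => !(xs.contains y))) := by
  intro n
  induction n with
  | zero =>
    intro xs hlen ys
    have : xs = [] := List.eq_nil_of_length_eq_zero (Nat.le_zero.mp hlen)
    subst this
    simp only [List.nil_append, List.contains_nil, Bool.not_false, List.filter_true]
    rw [fo]
    simp
  | succ n ih =>
    intro xs hlen ys
    cases xs with
    | nil =>
      simp only [List.nil_append, List.contains_nil, Bool.not_false, List.filter_true]
      rw [fo]
      simp
    | cons p xs' =>
      have hflen : (xs'.filter (fun q => q != p)).length ≤ n := by
        have := List.length_filter_le (fun q => q != p) xs'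
        simp only [List.length_cons] at hlen
        omega
      rw [List.cons_append, fo, fo, List.filter_append,
        ih _ hflen (ys.filter (fun q => q != p)), List.cons_append]
      congr 2
      rw [List.filter_filter]
      apply congrArg
      apply List.filter_congr
      intro y _
      by_cases hyp : y = p
      · subst hyp; simp
      · by_cases hyx : y ∈ xs'
        · simp [hyp, hyx]
        · simp [hyp, hyx]

-- ======== stage K : evaluating the priority function ========

theorem K_SH (t : String) (cs : List String) (p : String) (h : p ∈ pvSHARED) :
    Kf t cs p = (pvSHARED.idxOf p : Int) := by
  unfold Kf; rw [if_pos h]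

theorem K_SD (t : String) (cs : List String) (p : String) (h1 : p ∉ pvSHARED)
    (h2 : pvDirOf t ≠ "") (h3 : pvDirOf p = pvDirOf t) :
    Kf t cs p = 5 + (cs.idxOf p : Int) := by
  unfold Kf; rw [if_neg h1, if_pos ⟨h2, h3⟩]

theorem K_REV (t : String) (cs : List String) (p : String) (h1 : p ∉ pvSHARED)
    (h2 : ¬(pvDirOf t ≠ "" ∧ pvDirOf p = pvDirOf t)) :
    Kf t cs p = 5 + (cs.length : Int) + (cs.reverse.idxOf p : Int) := by
  unfold Kf; rw [if_neg h1, if_neg h2]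

def pvSD (t : String) (cs : List String) : List String :=
  if pvDirOf t ≠ "" then cs.filter (fun c => pvDirOf c == pvDirOf t) else []

theorem mem_pvSD (t : String) (cs : List String) (a : String) (ha : a ∈ pvSD t cs) :
    pvDirOf t ≠ "" ∧ pvDirOf a = pvDirOf t ∧ a ∈ cs := by
  unfold pvSD at ha
  by_cases htd : pvDirOf t ≠ ""
  · rw [if_pos htd] at ha
    refine ⟨htd, ?_, (List.mem_filter.mp ha).1⟩
    have := List.of_mem_filter ha
    simpa using this
  · rw [if_neg htd] at ha
    simp at ha

theorem pvSD_full (t : String) (cs : List String) (a : String) (ha : a ∈ cs)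
    (htd : pvDirOf t ≠ "") (hdir : pvDirOf a = pvDirOf t) : a ∈ pvSD t cs := by
  unfold pvSD
  rw [if_pos htd]
  exact List.mem_filter.mpr ⟨ha, by simp [hdir]⟩

theorem pairwise_K (t : String) (cs : List String) :
    (fo (pvOrdered t cs)).Pairwise
      (fun a b => a ≠ t → a ∈ cs → b ≠ t → b ∈ cs → Kf t cs a < Kf t cs b) := by
  have hSHnd : pvSHARED.Nodup := by decide
  have hord : pvOrdered t cs = pvSHARED ++ (pvSD t cs ++ cs.reverse) := rfl
  rw [hord, fo_append pvSHARED.length pvSHARED (le_refl _) (pvSD t cs ++ cs.reverse),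
    List.filter_append,
    fo_append ((pvSD t cs).filter (fun y => !(pvSHARED.contains y))).length _ (le_refl _) _,
    fo_eq_self_of_nodup _ hSHnd]
  -- abbreviations
  have hL2mem : ∀ a, a ∈ fo ((pvSD t cs).filter (fun y => !(pvSHARED.contains y))) →
      a ∉ pvSHARED ∧ pvDirOf t ≠ "" ∧ pvDirOf a = pvDirOf t ∧ a ∈ cs := by
    intro a ha
    have ha' := (mem_fo _ _ (le_refl _) a).mp ha
    have hg1 : a ∉ pvSHARED := by
      have := List.of_mem_filter ha'
      simpa using this
    rcases mem_pvSD t cs a (List.mem_filter.mp ha').1 with ⟨h1, h2, h3⟩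
    exact ⟨hg1, h1, h2, h3⟩
  have hL3mem : ∀ b, b ∈ fo ((cs.reverse.filter (fun y => !(pvSHARED.contains y))).filter
        (fun y => !(((pvSD t cs).filter (fun y => !(pvSHARED.contains y))).contains y))) →
      b ∈ cs → b ∉ pvSHARED ∧ ¬(pvDirOf t ≠ "" ∧ pvDirOf b = pvDirOf t) := by
    intro b hb hbcs
    have hb' := (mem_fo _ _ (le_refl _) b).mp hb
    have hg2 : b ∉ (pvSD t cs).filter (fun y => !(pvSHARED.contains y)) := by
      intro hmem
      have h1 := List.of_mem_filter hb'
      have hc : ((pvSD t cs).filter (fun y => !(pvSHARED.contains y))).contains b = true := by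
        rw [List.contains_eq_mem]
        rcases List.mem_filter.mp hmem with ⟨hm1, hm2⟩
        simp only [decide_eq_true_eq, List.mem_filter]
        exact ⟨hm1, hm2⟩
      rw [hc] at h1
      simp at h1
    have hb'' := (List.mem_filter.mp hb').1
    have hg1 : b ∉ pvSHARED := by
      have := List.of_mem_filter hb''
      simpa using this
    refine ⟨hg1, ?_⟩
    rintro ⟨htd, hdir⟩
    exact hg2 (List.mem_filter.mpr ⟨pvSD_full t cs b hbcs htd hdir, by simp [hg1]⟩)
  have hSHlt : ∀ a, a ∈ pvSHARED → pvSHARED.idxOf a < 5 := by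
    intro a ha
    have := List.idxOf_lt_length_of_mem ha
    simpa using this
  rw [List.pairwise_append]
  refine ⟨?_, ?_, ?_⟩
  · -- within shared
    have hbase : pvSHARED.Pairwise
        (fun a b => (pvSHARED.idxOf a : Int) < (pvSHARED.idxOf b : Int)) := by decide
    refine List.Pairwise.imp_of_mem ?_ hbase
    intro a b ha hb hlt _ _ _ _
    rw [K_SH t cs a ha, K_SH t cs b hb]
    exact hlt
  · rw [List.pairwise_append]
    refine ⟨?_, ?_, ?_⟩
    · -- within same-directory block
      refine List.Pairwise.imp_of_mem ?_ (fo_pairwise_idxOf _ _ (le_refl _))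
      intro a b ha hb hlt hat hacs hbt hbcs
      rcases hL2mem a ha with ⟨haSH, htd, hadir, hacs'⟩
      rcases hL2mem b hb with ⟨hbSH, _, hbdir, hbcs'⟩
      rw [K_SD t cs a haSH htd hadir, K_SD t cs b hbSH htd hbdir]
      have ha' := (mem_fo _ _ (le_refl _) a).mp ha
      have hb' := (mem_fo _ _ (le_refl _) b).mp hb
      unfold pvSD at ha' hb' hlt
      rw [if_pos htd] at ha' hb' hlt
      rw [List.filter_filter] at ha' hb' hlt
      have := idxOf_filter_lt _ cs a b ha' hb' hlt
      omega
    · -- within recency block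
      refine List.Pairwise.imp_of_mem ?_ (fo_pairwise_idxOf _ _ (le_refl _))
      intro a b ha hb hlt hat hacs hbt hbcs
      rcases hL3mem a ha hacs with ⟨haSH, hand⟩
      rcases hL3mem b hb hbcs with ⟨hbSH, hbnd⟩
      rw [K_REV t cs a haSH hand, K_REV t cs b hbSH hbnd]
      have ha' := (mem_fo _ _ (le_refl _) a).mp ha
      have hb' := (mem_fo _ _ (le_refl _) b).mp hb
      rw [List.filter_filter] at ha' hb' hlt
      have := idxOf_filter_lt _ cs.reverse a b ha' hb' hlt
      omega
    · -- same-directory block before recency block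
      intro a ha b hb hat hacs hbt hbcs
      rcases hL2mem a ha with ⟨haSH, htd, hadir, hacs'⟩
      rcases hL3mem b hb hbcs with ⟨hbSH, hbnd⟩
      rw [K_SD t cs a haSH htd hadir, K_REV t cs b hbSH hbnd]
      have hidx : cs.idxOf a < cs.length := List.idxOf_lt_length_of_mem hacs
      have : (0:Int) ≤ (cs.reverse.idxOf b : Int) := Int.natCast_nonneg _
      omega
  · -- shared block before the rest
    intro a ha b hb hat hacs hbt hbcs
    rw [K_SH t cs a ha]
    have h5 := hSHlt a ha
    rcases List.mem_append.mp hb with hb2 | hb3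
    · rcases hL2mem b hb2 with ⟨hbSH, htd, hbdir, hbcs'⟩
      rw [K_SD t cs b hbSH htd hbdir]
      have : (0:Int) ≤ (cs.idxOf b : Int) := Int.natCast_nonneg _
      omega
    · rcases hL3mem b hb3 hbcs with ⟨hbSH, hbnd⟩
      rw [K_REV t cs b hbSH hbnd]
      have h1 : (0:Int) ≤ (cs.length : Int) := Int.natCast_nonneg _
      have h2 : (0:Int) ≤ (cs.reverse.idxOf b : Int) := Int.natCast_nonneg _
      omega

-- ======== stage B : evaluating the dicts ========

theorem find?_congr' {α : Type} (p q : α → Bool) (l : List α) (h : ∀ a ∈ l, p a = q a) :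
    l.find? p = l.find? q := by
  induction l with
  | nil => rfl
  | cons x l' ih =>
    rw [List.find?_cons, List.find?_cons, h x (by simp)]
    cases q x
    · exact ih (fun a ha => h a (List.mem_cons_of_mem _ ha))
    · rfl

theorem foldl_cond_insert_get? (g : Int × String → Int) (c : Int × String → Bool) :
    ∀ (l : List (Int × String)) (d : PySem.Dict String Int) (p : String),
    (l.foldl (fun d q => if c q then d.insert q.2 (g q) else d) d).get? p
      = (match l.reverse.find? (fun q => c q && q.2 == p) with
         | some q => some (g q)
         | none => d.get? p) := by
  intro l
  induction l with
  | nil => intro d p; rfl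
  | cons q0 l ih =>
    intro d p
    rw [List.foldl_cons, ih, List.reverse_cons, List.find?_append]
    cases hf : l.reverse.find? (fun q => c q && q.2 == p) with
    | some q1 => simp [Option.or]
    | none =>
      simp only [Option.or, List.find?_cons, List.find?_nil]
      by_cases hc : c q0 = true
      · by_cases hqp : q0.2 = p
        · simp only [hc, hqp, beq_self_eq_true, Bool.and_true, if_pos]
          simp [PySem.Dict.get?_insert_self]
        · have : (c q0 && (q0.2 == p)) = false := by
            simp [hqp]
          rw [this]
          rw [if_pos hc]
          exact PySem.Dict.get?_insert_of_ne d (g q0) (fun h => hqp h.symm)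
      · have : (c q0 && (q0.2 == p)) = false := by simp [hc]
        rw [this, if_neg hc]

theorem foldl_contains_insert_get? (g : Int × String → Int) :
    ∀ (l : List (Int × String)) (d : PySem.Dict String Int) (p : String),
    (l.foldl (fun d q => if d.contains q.2 then d.insert q.2 (g q) else d) d).get? p
      = (match l.reverse.find? (fun q => d.contains q.2 && q.2 == p) with
         | some q => some (g q)
         | none => d.get? p) := by
  intro l
  induction l with
  | nil => intro d p; rfl
  | cons q0 l ih =>
    intro d p
    by_cases hc : d.contains q0.2 = true
    · have hkeep : ∀ x, (d.insert q0.2 (g q0)).contains x = d.contains x := by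
        intro x
        rw [PySem.Dict.contains_insert]
        by_cases hx : x = q0.2
        · subst hx; simp [hc]
        · simp [hx]
      rw [List.foldl_cons, if_pos hc, ih, List.reverse_cons, List.find?_append,
        find?_congr' (fun q => (d.insert q0.2 (g q0)).contains q.2 && q.2 == p)
          (fun q => d.contains q.2 && q.2 == p) l.reverse (fun a _ => by dsimp only; rw [hkeep])]
      cases hf : l.reverse.find? (fun q => d.contains q.2 && q.2 == p) with
      | some q1 => simp [Option.or]
      | none =>
        simp only [Option.or, List.find?_cons, List.find?_nil]
        by_cases hqp : q0.2 = p
        · simp only [hqp, beq_self_eq_true, Bool.and_true]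
          rw [← hqp, hc]
          simp [hqp, PySem.Dict.get?_insert_self]
        · have : (d.contains q0.2 && (q0.2 == p)) = false := by simp [hqp]
          rw [this]
          exact PySem.Dict.get?_insert_of_ne d (g q0) (fun h => hqp h.symm)
    · rw [List.foldl_cons, if_neg hc, ih, List.reverse_cons, List.find?_append]
      cases hf : l.reverse.find? (fun q => d.contains q.2 && q.2 == p) with
      | some q1 => simp [Option.or]
      | none =>
        simp only [Option.or, List.find?_cons, List.find?_nil]
        have : (d.contains q0.2 && (q0.2 == p)) = false := by simp [hc]
        rw [this]

theorem keys_cond_insert (c : Int × String → Bool) (g : Int × String → Int) :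
    ∀ (l : List (Int × String)) (d : PySem.Dict String Int),
      (∀ q ∈ l, c q = true → d.contains q.2 = true) →
      (l.foldl (fun d q => if c q then d.insert q.2 (g q) else d) d).keys = d.keys := by
  intro l
  induction l with
  | nil => intro d _; rfl
  | cons q0 l ih =>
    intro d h
    rw [List.foldl_cons]
    by_cases hc : c q0 = true
    · rw [if_pos hc]
      have hcont : d.contains q0.2 = true := h q0 (by simp) hc
      rw [ih _ ?_, PySem.Dict.keys_insert_of_contains d _ hcont]
      intro q hq hcq
      rw [PySem.Dict.contains_insert]
      simp [h q (List.mem_cons_of_mem _ hq) hcq]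
    · rw [if_neg hc]
      exact ih _ (fun q hq hcq => h q (List.mem_cons_of_mem _ hq) hcq)

theorem keys_contains_insert (g : Int × String → Int) :
    ∀ (l : List (Int × String)) (d : PySem.Dict String Int),
      (l.foldl (fun d q => if d.contains q.2 then d.insert q.2 (g q) else d) d).keys = d.keys := by
  intro l
  induction l with
  | nil => intro d; rfl
  | cons q0 l ih =>
    intro d
    rw [List.foldl_cons]
    by_cases hc : d.contains q0.2 = true
    · rw [if_pos hc, ih, PySem.Dict.keys_insert_of_contains d _ hc]
    · rw [if_neg hc, ih]

theorem get?_erase_ne (d : PySem.Dict String Int) (t p : String) (h : p ≠ t) :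
    (d.erase t).get? p = d.get? p := by
  show ((d.items.filter (fun q => !(q.1 == t))).find? (fun q => q.1 == p)).map (·.2)
    = (d.items.find? (fun q => q.1 == p)).map (·.2)
  congr 1
  induction d.items with
  | nil => rfl
  | cons q0 l ih =>
    by_cases hqt : q0.1 = t
    · have hqp : (q0.1 == p) = false := by
        simp only [beq_eq_false_iff_ne, ne_eq, hqt]
        exact fun hh => h hh.symm
      rw [List.filter_cons_of_neg (by simp [hqt]),
        List.find?_cons_of_neg (p := fun q : String × Int => q.1 == p) (by simpa using hqp), ih]
    · rw [List.filter_cons_of_pos (by simp [hqt])]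
      cases h2 : (q0.1 == p) with
      | true =>
        rw [List.find?_cons_of_pos (p := fun q : String × Int => q.1 == p) h2,
          List.find?_cons_of_pos (p := fun q : String × Int => q.1 == p) h2]
      | false =>
        rw [List.find?_cons_of_neg (p := fun q : String × Int => q.1 == p) (by simp [h2]),
          List.find?_cons_of_neg (p := fun q : String × Int => q.1 == p) (by simp [h2]), ih]

theorem keys_erase' (d : PySem.Dict String Int) (t : String) :
    (d.erase t).keys = d.keys.filter (fun x => x != t) := by
  show (d.items.filter (fun q => !(q.1 == t))).map (·.1) = (d.items.map (·.1)).filter (fun x => x != t)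
  induction d.items with
  | nil => rfl
  | cons q0 l ih =>
    by_cases hqt : q0.1 = t
    · rw [List.filter_cons_of_neg (by simp [hqt]), List.map_cons,
        List.filter_cons_of_neg (by simp [hqt]), ih]
    · rw [List.filter_cons_of_pos (by simp [hqt]), List.map_cons, List.map_cons,
        List.filter_cons_of_pos (by simp [hqt]), ih]

theorem enum_find?_fwd (p : String) :
    ∀ (cs : List String) (s : Int), p ∈ cs →
      (PySem.List.enumerate cs s).find? (fun q => q.2 == p) = some (s + (cs.idxOf p : Int), p) := by
  intro cs
  induction cs with
  | nil => intro s h; simp at h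
  | cons c cs' ih =>
    intro s h
    rw [PySem.List.enumerate_cons]
    by_cases hcp : c = p
    · subst hcp
      rw [List.find?_cons_of_pos (by simp)]
      simp [List.idxOf_cons_self]
    · have hp' : p ∈ cs' := by
        rcases List.mem_cons.mp h with heq | h'
        · exact absurd heq.symm hcp
        · exact h'
      rw [List.find?_cons_of_neg (by simp [hcp]), ih (s + 1) hp',
        List.idxOf_cons_ne _ (Ne.symm ?_)]
      · simp only [Option.some.injEq, Prod.mk.injEq]
        refine ⟨?_, trivial⟩
        push_cast [Nat.succ_eq_add_one]
        omega
      · exact fun heq => hcp heq.symm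

theorem enum_find?_rev (p : String) :
    ∀ (cs : List String) (s : Int), p ∈ cs →
      (PySem.List.enumerate cs s).reverse.find? (fun q => q.2 == p)
        = some (s + (cs.length : Int) - 1 - (cs.reverse.idxOf p : Int), p) := by
  intro cs
  induction cs using List.reverseRecOn with
  | nil => intro s h; simp at h
  | append_singleton cs' x ih =>
    intro s h
    rw [PySem.List.enumerate_append, List.reverse_append, PySem.List.enumerate_cons]
    simp only [PySem.List.enumerate_nil, List.reverse_cons, List.reverse_nil, List.nil_append,
      List.cons_append, List.reverse_append]
    by_cases hxp : x = p
    · subst hxp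
      rw [List.find?_cons_of_pos (by simp), List.idxOf_cons_self]
      simp only [Option.some.injEq, Prod.mk.injEq, List.length_append, List.length_cons,
        List.length_nil]
      refine ⟨?_, trivial⟩
      push_cast
      omega
    · have hp' : p ∈ cs' := by
        rcases List.mem_append.mp h with h' | h'
        · exact h'
        · exact absurd (List.mem_singleton.mp h').symm hxp
      rw [List.find?_cons_of_neg (by simp [hxp]), ih s hp', List.idxOf_cons_ne _ hxp]
      simp only [Option.some.injEq, Prod.mk.injEq, List.length_append, List.length_cons,
        List.length_nil]
      refine ⟨?_, trivial⟩
      push_cast [Nat.succ_eq_add_one]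
      omega

theorem keys_pvD4 (t : String) (cs : List String) :
    (pvD4 t cs).keys = (PySem.Set.ofList cs).filter (fun x => x != t) := by
  have hk1 : (pvD1 cs).keys = PySem.Set.ofList cs := by
    unfold pvD1
    rw [PySem.Dict.keys_foldl_insert_key (PySem.List.enumerate cs) (fun q => q.2)
        (fun _ q => 5 + (PySem.List.len cs) + ((PySem.List.len cs) - 1 - q.1)) PySem.Dict.empty,
      PySem.Dict.keys_empty, PySem.Set.update_nil_left, PySem.List.map_snd_enumerate]
  have hk2 : (pvD2 t cs).keys = (pvD1 cs).keys := by
    unfold pvD2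
    apply keys_cond_insert
    intro q hq _
    rw [PySem.Dict.contains_iff_mem_keys, hk1, PySem.Set.mem_ofList]
    rcases (PySem.List.mem_enumerate_iff cs 0 q).mp (List.mem_reverse.mp hq) with ⟨k, hk, rfl⟩
    exact List.getElem_mem hk
  have hk3 : (pvD3 t cs).keys = (pvD2 t cs).keys := by
    unfold pvD3
    apply keys_contains_insert
  unfold pvD4
  rw [keys_erase', hk3, hk2, hk1]

theorem getD_pvD4 (t : String) (cs : List String) (p : String) (hp : p ∈ cs) (hpt : p ≠ t) :
    (pvD4 t cs).getD p 0 = Kf t cs p := by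
  have hcont2 : ∀ x, (pvD2 t cs).contains x = cs.contains x := by
    intro x
    have hk1 : (pvD1 cs).keys = PySem.Set.ofList cs := by
      unfold pvD1
      rw [PySem.Dict.keys_foldl_insert_key (PySem.List.enumerate cs) (fun q => q.2)
          (fun _ q => 5 + (PySem.List.len cs) + ((PySem.List.len cs) - 1 - q.1)) PySem.Dict.empty,
        PySem.Dict.keys_empty, PySem.Set.update_nil_left, PySem.List.map_snd_enumerate]
    have hk2 : (pvD2 t cs).keys = (pvD1 cs).keys := by
      unfold pvD2
      apply keys_cond_insert
      intro q hq _
      rw [PySem.Dict.contains_iff_mem_keys, hk1, PySem.Set.mem_ofList]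
      rcases (PySem.List.mem_enumerate_iff cs 0 q).mp (List.mem_reverse.mp hq) with ⟨k, hk, rfl⟩
      exact List.getElem_mem hk
    by_cases hx : x ∈ cs
    · have : (pvD2 t cs).contains x = true := by
        rw [PySem.Dict.contains_iff_mem_keys, hk2, hk1, PySem.Set.mem_ofList]; exact hx
      rw [this, List.contains_eq_mem]; simp [hx]
    · have : ¬ (pvD2 t cs).contains x = true := by
        rw [PySem.Dict.contains_iff_mem_keys, hk2, hk1, PySem.Set.mem_ofList]; exact hx
      rw [Bool.not_eq_true] at this
      rw [this, List.contains_eq_mem]; simp [hx]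
  rw [PySem.Dict.getD_eq_get?_getD]
  unfold pvD4
  rw [get?_erase_ne _ _ _ hpt]
  unfold pvD3
  rw [foldl_contains_insert_get?,
    find?_congr' (fun q => (pvD2 t cs).contains q.2 && q.2 == p)
      (fun q => cs.contains q.2 && q.2 == p) (PySem.List.enumerate pvSHARED).reverse
      (fun a _ => by dsimp only; rw [hcont2])]
  by_cases hSH : p ∈ pvSHARED
  · rw [K_SH t cs p hSH]
    fin_cases hSH <;>
      simp [pvSHARED, PySem.List.enumerate_cons, List.find?, hp, List.idxOf_cons_self,
        List.idxOf_cons_ne]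
  · -- p is none of the five shared literals
    have hne : ∀ x ∈ pvSHARED, ¬((x == p) = true) := by
      intro x hx hxp
      exact hSH ((eq_of_beq hxp) ▸ hx)
    have hfind : ((PySem.List.enumerate pvSHARED).reverse.find?
        (fun q => cs.contains q.2 && q.2 == p)) = none := by
      rw [List.find?_eq_none]
      intro x hx
      rcases (PySem.List.mem_enumerate_iff pvSHARED 0 x).mp (List.mem_reverse.mp hx) with ⟨k, hk, rfl⟩
      simp only [Bool.and_eq_true, beq_iff_eq]
      rintro ⟨-, heq⟩
      exact hSH (heq ▸ List.getElem_mem hk)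
    rw [hfind]
    unfold pvD2
    rw [foldl_cond_insert_get?, List.reverse_reverse]
    by_cases htd : pvDirOf t ≠ "" ∧ pvDirOf p = pvDirOf t
    · have hcongr : ∀ a ∈ PySem.List.enumerate cs 0,
          ((pvDirOf t != "") && (pvDirOf a.2 == pvDirOf t) && (a.2 == p)) = (a.2 == p) := by
        intro a _
        by_cases hap : a.2 = p
        · simp [hap, htd.2, bne_iff_ne, htd.1]
        · simp [hap]
      rw [find?_congr' _ _ _ hcongr, enum_find?_fwd p cs 0 hp, K_SD t cs p hSH htd.1 htd.2]
      simp
    · have hcongr : ∀ a ∈ PySem.List.enumerate cs 0,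
          ((pvDirOf t != "") && (pvDirOf a.2 == pvDirOf t) && (a.2 == p)) = false := by
        intro a _
        by_cases hap : a.2 = p
        · rcases not_and_or.mp htd with h' | h'
          · simp only [ne_eq, not_not] at h'
            simp [h']
          · simp [hap, h']
        · simp [hap]
      rw [find?_congr' _ _ _ hcongr]
      have : (PySem.List.enumerate cs 0).find? (fun _ => false) = none := by
        rw [List.find?_eq_none]; simp
      rw [this]
      unfold pvD1
      have hfold : (fun (d : PySem.Dict String Int) (q : Int × String) =>
            d.insert q.2 (5 + (PySem.List.len cs) + ((PySem.List.len cs) - 1 - q.1)))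
          = (fun d q => if (fun (_ : Int × String) => true) q then
              d.insert q.2 (5 + (PySem.List.len cs) + ((PySem.List.len cs) - 1 - q.1)) else d) := by
        funext d q; simp
      rw [hfold, foldl_cond_insert_get?]
      have hcongr2 : ∀ a ∈ (PySem.List.enumerate cs 0).reverse,
          ((fun (_ : Int × String) => true) a && (a.2 == p)) = (a.2 == p) := by
        intro a _; simp
      rw [find?_congr' _ _ _ hcongr2, enum_find?_rev p cs 0 hp, K_REV t cs p hSH htd]
      simp only [Option.getD_some, PySem.List.len_eq]
      have hlt : cs.reverse.idxOf p < cs.length := by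
        have := List.idxOf_lt_length_of_mem (List.mem_reverse.mpr hp)
        simpa using this
      omega

-- ======== assembly ========

theorem sorted_eq_dd (t : String) (cs : List String) :
    PySem.List.sorted (pvD4 t cs).keys (fun p => (pvD4 t cs).getD p 0) false
      = dd t cs [] (pvOrdered t cs) := by
  have hmemD : ∀ x, x ∈ dd t cs [] (pvOrdered t cs) ↔ (x ∈ cs ∧ x ≠ t) := by
    intro x
    rw [mem_dd]
    constructor
    · rintro ⟨_, _, h3, h4⟩; exact ⟨h4, h3⟩
    · rintro ⟨h1, h2⟩
      refine ⟨?_, by simp, h2, h1⟩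
      show x ∈ pvSHARED ++ _
      exact List.mem_append.mpr (Or.inr (List.mem_append.mpr (Or.inr (List.mem_reverse.mpr h1))))
  apply PySem.List.sorted_eq_of_perm_of_pairwise_lt
  · rw [List.perm_ext_iff_of_nodup (nodup_dd t cs _ [])
      (by rw [keys_pvD4]; exact (PySem.Set.nodup_ofList cs).filter _)]
    intro x
    rw [hmemD, keys_pvD4, List.mem_filter, PySem.Set.mem_ofList]
    simp [bne_iff_ne]
  · have hfo := dd_fo t cs (pvOrdered t cs).length (pvOrdered t cs) (le_refl _) []
    rw [hfo]
    refine List.Pairwise.imp_of_mem ?_ (dd_pairwise t cs (Kf t cs) _ [] (pairwise_K t cs))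
    intro a b ha hb hlt
    rw [← hfo] at ha hb
    rcases (hmemD a).mp ha with ⟨hacs, hat⟩
    rcases (hmemD b).mp hb with ⟨hbcs, hbt⟩
    rw [getD_pvD4 t cs a hacs hat, getD_pvD4 t cs b hbcs hbt]
    exact hlt

-- ===== VERDICT (by name: the statement is the Claim_ definition above) =====
theorem pick_relevant_files_py_spec : Claim_equal_pick_relevant_files_py := by
  intro t cs m _
  unfold Spec_pick_relevant_files_py
  rw [A_eq_take, B_unfold, sorted_eq_dd, foldl_pstep_eq_dd, List.nil_append]
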